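-- pv_equiv track=rewrite | github.com/krocriux/TICS311 | semana_12_03/Extras/CL/grafixCorrupt/grafixCorrupt.py | selectWord
-- ===== SOURCE A (Python) =====
-- def selectWord(dictionary, candidate):
--     most_similar_index = 0
--     max_number_matches = 0
--     for word in dictionary:
--         matches = 0
--         for i in range(len(word)):
--             if word[i] == candidate[i]:
--                 matches += 1
--         if matches > max_number_matches:
--             max_number_matches = matches
--             most_similar_index = dictionary.index(word)
--     if max_number_matches == 0:
--         return -1
--     else:
--         return most_similar_index
-- ===== SOURCE B (Python) =====
-- def selectWord(dictionary, candidate):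
--     # Column-major: sweep candidate positions (up to the longest word; later columns
--     # credit nobody), crediting every word at once; then a backward scan with >=
--     # keeps the first index of the maximum.
--     counts = [0] * len(dictionary)
--     limit = min(len(candidate), max(map(len, dictionary), default=0))
--     for i in range(limit):
--         counts = [c + (i < len(w) and w[i] == candidate[i])
--                   for c, w in zip(counts, dictionary)]
--     best_index = -1
--     best = 0
--     for j in reversed(range(len(counts))):
--         x = counts[j]
--         if x > 0 and x >= best:
--             best_index = j
--             best = x
--     return best_index
-- ===== Notes on version B (the rewrite author's own statement) =====
-- stated objective: alternative
-- what changed: Replaces A's word-by-word scan with a running max and dictionary.index lookups by a column-major algorithm: one sweep over the candidate's positions (bounded by the longest word) credits all words at once via a zipped counts table, then a backward scan with >= selects the first index of the maximum.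
import Mathlib
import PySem

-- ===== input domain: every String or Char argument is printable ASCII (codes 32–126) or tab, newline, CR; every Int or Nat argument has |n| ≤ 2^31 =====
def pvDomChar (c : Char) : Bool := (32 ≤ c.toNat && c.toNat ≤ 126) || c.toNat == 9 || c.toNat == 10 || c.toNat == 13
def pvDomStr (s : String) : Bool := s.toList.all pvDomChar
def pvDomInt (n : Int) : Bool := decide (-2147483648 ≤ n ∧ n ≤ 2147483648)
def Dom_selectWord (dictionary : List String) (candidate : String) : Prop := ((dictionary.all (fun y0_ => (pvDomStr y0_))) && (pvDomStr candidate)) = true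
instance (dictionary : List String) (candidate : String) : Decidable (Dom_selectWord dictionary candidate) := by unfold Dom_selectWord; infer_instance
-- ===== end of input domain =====

-- B replaces A's word-by-word scan with a running max (and dictionary.index lookups) by a
-- column-major algorithm: one sweep over the candidate's positions credits every word at once
-- (a zip over a counts table), then a backward scan with >= picks the first index of the maximum.

-- ===== PORT A =====
def selectWord (dictionary : List String) (candidate : String) : Int :=
  let st := dictionary.foldl (fun (s : Int × Int) word =>
      let nmatch : Int := (PySem.List.pyRange 0 (PySem.Str.len word) 1).foldl
          (fun m i => if PySem.Str.pyGet? word i = PySem.Str.pyGet? candidate i then m + 1 else m) 0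
      if nmatch > s.2 then
        ((((PySem.List.index? dictionary word).getD 0 : Nat) : Int), nmatch)
      else s) (0, 0)
  if st.2 = 0 then -1 else st.1

-- ===== PORT B =====
def selectWord_alt (dictionary : List String) (candidate : String) : Int :=
  -- counts = [0] * len(dictionary); column sweep over candidate positions
  let counts0 : List Int := List.replicate dictionary.length 0
  let limit : Int := min (PySem.Str.len candidate)
      (PySem.List.maxD (dictionary.map PySem.Str.len) (fun y => y) 0)
  let counts : List Int := (PySem.List.pyRange 0 limit 1).foldl
      (fun counts i => List.zipWith
        (fun c w => c + (if i < (PySem.Str.len w : Int) ∧ PySem.Str.pyGet? w i = PySem.Str.pyGet? candidate i then 1 else 0))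
        counts dictionary) counts0
  -- backward argmax scan: for j in reversed(range(len(counts)))
  let st := ((PySem.List.pyRange 0 (counts.length : Int) 1).reverse).foldl
      (fun (st : Int × Int) j =>
        -- j always indexes inside counts, so pyGet? is `some` here and getD 0 is exact
        let x := (PySem.List.pyGet? counts j).getD 0
        if x > 0 ∧ x ≥ st.2 then (j, x) else st) (-1, 0)
  st.1

-- ===== PRECONDITION & SPEC =====
-- Pre_ excludes exactly the inputs where Python A raises IndexError:
-- a dictionary word longer than the candidate makes candidate[i] go out of range.
def Pre_selectWord (dictionary : List String) (candidate : String) : Prop :=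
  ∀ w ∈ dictionary, PySem.Str.len w ≤ PySem.Str.len candidate
instance (dictionary : List String) (candidate : String) : Decidable (Pre_selectWord dictionary candidate) := by unfold Pre_selectWord; infer_instance
def pvWitness_selectWord : List String × String := (["ab", "c"], "ax")

def Spec_selectWord (dictionary : List String) (candidate : String) (out : Int) : Prop := out = selectWord_alt dictionary candidate
instance (dictionary : List String) (candidate : String) (out : Int) : Decidable (Spec_selectWord dictionary candidate out) := by unfold Spec_selectWord; infer_instance

-- ===== CLAIM (what is proved, stated in full; the proofs are below) =====
def Claim_equal_selectWord : Prop := ∀ (dictionary : List String) (candidate : String), Dom_selectWord dictionary candidate → Pre_selectWord dictionary candidate → Spec_selectWord dictionary candidate (selectWord dictionary candidate)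
-- ===== LEMMAS AND PROOFS =====

-- A's per-word score (the count its inner loop computes)
def pvScore (candidate w : String) : Int :=
  (((PySem.List.pyRange 0 (PySem.Str.len w) 1).countP
      (fun i => decide (PySem.Str.pyGet? w i = PySem.Str.pyGet? candidate i)) : Nat) : Int)

theorem pvScore_nonneg (c w : String) : 0 ≤ pvScore c w := by
  unfold pvScore; positivity

-- first index of v in xs (as Int); total, only used where v ∈ xs
def firstIdx : List Int → Int → Int
  | [], _ => 0
  | x :: xs, v => if x = v then 0 else 1 + firstIdx xs v

-- A's fold, re-expressed with explicit running indices
def foldIdx (sc : String → Int) : Nat → Int × Int → List String → Int × Int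
  | _, st, [] => st
  | n, st, w :: t => foldIdx sc (n + 1) (if sc w > st.2 then ((n : Int), sc w) else st) t

theorem foldl_stepA_eq_foldIdx (sc : String → Int) :
    ∀ (t pre : List String) (st : Int × Int),
      (∀ w' ∈ pre, sc w' ≤ st.2) →
      t.foldl (fun (s : Int × Int) word =>
          if sc word > s.2 then
            ((((PySem.List.index? (pre ++ t) word).getD 0 : Nat) : Int), sc word)
          else s) st
        = foldIdx sc pre.length st t := by
  intro t
  induction t with
  | nil => intro pre st _; simp [foldIdx]
  | cons w t ih =>
    intro pre st hinv
    simp only [List.foldl_cons, foldIdx]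
    by_cases h : sc w > st.2
    · have hnot : w ∉ pre := by
        intro hw
        exact absurd (hinv w hw) (by omega)
      have hidx : PySem.List.index? (pre ++ w :: t) w = some pre.length := by
        rw [PySem.List.index?_eq_some_iff]
        exact ⟨pre, t, rfl, rfl, hnot⟩
      have step : (pre ++ w :: t) = (pre ++ [w]) ++ t := by simp
      have := ih (pre ++ [w]) (((pre.length : Nat) : Int), sc w)
        (by
          intro w' hw'
          simp only [List.mem_append, List.mem_singleton] at hw'
          rcases hw' with hw' | rfl
          · exact le_of_lt (lt_of_le_of_lt (hinv w' hw') h)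
          · exact le_refl _)
      rw [hidx] at *
      simp only [h, if_pos, Option.getD_some]
      rw [step]
      simpa using this
    · have step : (pre ++ w :: t) = (pre ++ [w]) ++ t := by simp
      have := ih (pre ++ [w]) st
        (by
          intro w' hw'
          simp only [List.mem_append, List.mem_singleton] at hw'
          rcases hw' with hw' | rfl
          · exact hinv w' hw'
          · omega)
      simp only [h, if_false]
      rw [step]
      simpa [h] using this

theorem foldIdx_spec (sc : String → Int) :
    ∀ (t : List String) (n : Nat) (st : Int × Int),
      foldIdx sc n st t =
        (if t.foldl (fun a w => max a (sc w)) st.2 = st.2 then st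
         else ((n : Int) + firstIdx (t.map sc) (t.foldl (fun a w => max a (sc w)) st.2),
               t.foldl (fun a w => max a (sc w)) st.2)) := by
  intro t
  induction t with
  | nil => intro n st; simp [foldIdx]
  | cons w t ih =>
    intro n st
    have hmono := PySem.List.le_foldl_max_int t sc
    simp only [foldIdx, List.foldl_cons, List.map_cons]
    by_cases h : sc w > st.2
    · have hmax : max st.2 (sc w) = sc w := by omega
      rw [if_pos h, hmax, ih]
      have hM := (hmono (sc w)).1
      have hMne : t.foldl (fun a w => max a (sc w)) (sc w) ≠ st.2 := by omega
      rw [if_neg hMne]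
      by_cases hMw : t.foldl (fun a w => max a (sc w)) (sc w) = sc w
      · rw [if_pos hMw]
        simp [firstIdx, hMw]
      · rw [if_neg hMw]
        simp only [firstIdx, if_neg (by omega : ¬ sc w = t.foldl (fun a w => max a (sc w)) (sc w)), Prod.mk.injEq]
        refine ⟨by push_cast; ring, trivial⟩
    · have hmax : max st.2 (sc w) = st.2 := by omega
      rw [if_neg h, hmax, ih]
      by_cases hM : t.foldl (fun a w => max a (sc w)) st.2 = st.2
      · simp [hM]
      · have hgt : st.2 < t.foldl (fun a w => max a (sc w)) st.2 := by
          have := (hmono st.2).1; omega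
        rw [if_neg hM, if_neg hM]
        simp only [firstIdx, if_neg (by omega : ¬ sc w = t.foldl (fun a w => max a (sc w)) st.2), Prod.mk.injEq]
        refine ⟨by push_cast; ring, trivial⟩

-- characterisation of PORT A: first index of the maximal positive score, or -1
theorem selectWord_char (d : List String) (c : String) :
    selectWord d c =
      (if d.foldl (fun a w => max a (pvScore c w)) 0 = 0 then -1
       else firstIdx (d.map (pvScore c)) (d.foldl (fun a w => max a (pvScore c w)) 0)) := by
  unfold selectWord
  have hstep : (fun (s : Int × Int) word =>
      let nmatch : Int := (PySem.List.pyRange 0 (PySem.Str.len word) 1).foldl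
          (fun m i => if PySem.Str.pyGet? word i = PySem.Str.pyGet? c i then m + 1 else m) 0
      if nmatch > s.2 then
        ((((PySem.List.index? d word).getD 0 : Nat) : Int), nmatch)
      else s)
      = (fun (s : Int × Int) word =>
        if pvScore c word > s.2 then
          ((((PySem.List.index? d word).getD 0 : Nat) : Int), pvScore c word)
        else s) := by
    funext s word
    simp only [PySem.List.foldl_ite_add_one, pvScore, zero_add]
  simp only [hstep]
  have hA := foldl_stepA_eq_foldIdx (pvScore c) d [] (0, 0) (by simp)
  simp only [List.nil_append, List.length_nil] at hA
  rw [hA, foldIdx_spec]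
  by_cases hM : d.foldl (fun a w => max a (pvScore c w)) 0 = 0
  · simp [hM]
  · simp only [hM, if_false, Nat.cast_zero, zero_add]

-- zipWith over a mapped copy of the same list is a map
theorem zipWith_map_self (g : String → Int) (f : String → Int) :
    ∀ (d : List String), List.zipWith (fun c w => c + g w) (d.map f) d = d.map (fun w => f w + g w) := by
  intro d
  induction d with
  | nil => rfl
  | cons w t ih => simp [ih]

-- the column sweep builds the per-word sums
theorem colfold_eq_map (g : Int → String → Int) (d : List String) :
    ∀ (cols : List Int) (f : String → Int),
      cols.foldl (fun counts i => List.zipWith (fun c w => c + g i w) counts d) (d.map f)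
        = d.map (fun w => f w + (cols.map (fun i => g i w)).sum) := by
  intro cols
  induction cols with
  | nil => intro f; simp
  | cons i t ih =>
    intro f
    simp only [List.foldl_cons, zipWith_map_self, ih, List.map_cons, List.sum_cons]
    exact List.map_congr_left (fun w _ => by ring)

-- counting i < lw positions inside a longer range is counting over the shorter range
theorem countP_range_guard (p : Nat → Bool) (lw lc : Nat) (h : lw ≤ lc) :
    (List.range lc).countP (fun k => decide (k < lw) && p k) = (List.range lw).countP p := by
  obtain ⟨m, rfl⟩ := Nat.exists_eq_add_of_le h
  rw [List.range_add, List.countP_append]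
  have h2 : ((List.range m).map (lw + ·)).countP (fun k => decide (k < lw) && p k) = 0 := by
    rw [List.countP_eq_zero]
    intro a ha
    simp only [List.mem_map, List.mem_range] at ha
    obtain ⟨b, _, rfl⟩ := ha
    simp [Nat.not_lt.mpr (Nat.le_add_right lw b)]
  rw [h2, Nat.add_zero]
  apply List.countP_congr
  intro a ha
  simp [List.mem_range.mp ha]

-- pyRange over a Nat bound is the mapped Nat range
theorem pyRange_cast (n : Nat) :
    PySem.List.pyRange 0 (n : Int) 1 = (List.range n).map (fun k : Nat => (k : Int)) := by
  simp [PySem.List.pyRange_one, List.map_eq_flatMap]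

-- B's counts table is the list of A's per-word scores (under Pre_)
theorem alt_counts (d : List String) (c : String)
    (hpre : ∀ w ∈ d, PySem.Str.len w ≤ PySem.Str.len c) :
    (PySem.List.pyRange 0 (min (PySem.Str.len c) (PySem.List.maxD (d.map PySem.Str.len) (fun y => y) 0)) 1).foldl
        (fun counts i => List.zipWith
          (fun cnt w => cnt + (if i < (PySem.Str.len w : Int) ∧ PySem.Str.pyGet? w i = PySem.Str.pyGet? c i then 1 else 0))
          counts d) (List.replicate d.length 0)
      = d.map (pvScore c) := by
  have h0 : (List.replicate d.length (0 : Int)) = d.map (fun _ => 0) := by simp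
  rw [h0, colfold_eq_map]
  apply List.map_congr_left
  intro w hw
  rw [zero_add]
  rw [PySem.List.sum_map_ite_one_zero']
  unfold pvScore
  have hwM : PySem.Str.len w ≤ PySem.List.maxD (d.map PySem.Str.len) (fun y => y) 0 :=
    PySem.List.le_maxD_id (d.map PySem.Str.len) 0 (PySem.Str.len w) (List.mem_map_of_mem hw)
  have hw0 := PySem.Str.len_eq w
  have hc0 := PySem.Str.len_eq c
  have hL0 : 0 ≤ min (PySem.Str.len c) (PySem.List.maxD (d.map PySem.Str.len) (fun y => y) 0) := by
    have := hpre w hw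
    omega
  have hLcast : min (PySem.Str.len c) (PySem.List.maxD (d.map PySem.Str.len) (fun y => y) 0)
      = (((min (PySem.Str.len c) (PySem.List.maxD (d.map PySem.Str.len) (fun y => y) 0)).toNat : Nat) : Int) := by
    omega
  have hlen' : w.toList.length ≤ (min (PySem.Str.len c) (PySem.List.maxD (d.map PySem.Str.len) (fun y => y) 0)).toNat := by
    have := hpre w hw
    omega
  rw [PySem.Str.len_eq w, hLcast]
  rw [pyRange_cast, pyRange_cast, List.countP_map, List.countP_map]
  congr 1
  have hg := countP_range_guard (fun k => decide (PySem.Str.pyGet? w (k : Int) = PySem.Str.pyGet? c (k : Int)))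
      w.toList.length (min (PySem.Str.len c) (PySem.List.maxD (d.map PySem.Str.len) (fun y => y) 0)).toNat hlen'
  trans (List.range ((min (PySem.Str.len c) (PySem.List.maxD (d.map PySem.Str.len) (fun y => y) 0)).toNat)).countP
      (fun k => decide (k < w.toList.length) && decide (PySem.Str.pyGet? w (k : Int) = PySem.Str.pyGet? c (k : Int)))
  · exact List.countP_congr (fun a _ => by simp [Function.comp, Bool.decide_and, Nat.cast_lt])
  · rw [hg]
    exact (List.countP_congr (fun a _ => by simp [Function.comp])).symm

theorem foldr_max_nonneg : ∀ (s : List Int), 0 ≤ s.foldr max 0 := by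
  intro s
  induction s with
  | nil => simp
  | cons x t ih => exact le_max_of_le_right ih

-- the backward >=-scan selects the first index of the maximum (or keeps (-1, 0))
theorem sel_foldr : ∀ (s : List Int) (off : Nat), (∀ x ∈ s, 0 ≤ x) →
    (List.range s.length).foldr
      (fun j st => if s.getD j 0 > 0 ∧ s.getD j 0 ≥ st.2 then (((off + j : Nat) : Int), s.getD j 0) else st)
      (-1, 0)
    = (if s.foldr max 0 = 0 then ((-1 : Int), (0 : Int))
       else ((off : Int) + firstIdx s (s.foldr max 0), s.foldr max 0)) := by
  intro s
  induction s with
  | nil => intro off _; simp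
  | cons x t ih =>
    intro off hs
    have hx0 : 0 ≤ x := hs x (by simp)
    have hMt0 : 0 ≤ t.foldr max 0 := foldr_max_nonneg t
    have hfun : (fun (j : Nat) (st : Int × Int) =>
          if (x :: t).getD (j + 1) 0 > 0 ∧ (x :: t).getD (j + 1) 0 ≥ st.2
          then (((off + (j + 1) : Nat) : Int), (x :: t).getD (j + 1) 0) else st)
        = (fun j st => if t.getD j 0 > 0 ∧ t.getD j 0 ≥ st.2
            then (((off + 1 + j : Nat) : Int), t.getD j 0) else st) := by
      funext j st
      have hn : off + (j + 1) = off + 1 + j := by omega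
      simp [hn]
    have ih' := ih (off + 1) (fun y hy => hs y (by simp [hy]))
    rw [List.length_cons, List.range_succ_eq_map, List.foldr_cons, List.foldr_map]
    simp only [Nat.succ_eq_add_one]
    rw [hfun, ih']
    simp only [List.getD_cons_zero, Nat.add_zero, List.foldr_cons]
    by_cases hMt : t.foldr max 0 = 0
    · rw [if_pos hMt]
      by_cases hx : x > 0
      · have hmx : max x (t.foldr max 0) = x := by omega
        rw [if_pos ⟨hx, hx0⟩, hmx, if_neg (by omega)]
        simp [firstIdx]
      · have hxz : x = 0 := by omega
        subst hxz
        rw [if_neg (fun h => absurd h.1 (lt_irrefl 0)), if_pos (by omega : max 0 (t.foldr max 0) = 0)]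
    · have hMt' : 0 < t.foldr max 0 := by omega
      rw [if_neg hMt]
      by_cases hx : x > 0 ∧ x ≥ t.foldr max 0
      · have hmx : max x (t.foldr max 0) = x := by omega
        rw [if_pos ⟨hx.1, hx.2⟩, hmx, if_neg (by omega)]
        simp [firstIdx]
      · have hlt : x < t.foldr max 0 := by
          rcases not_and_or.mp hx with h1 | h2
          · omega
          · omega
        have hmx : max x (t.foldr max 0) = t.foldr max 0 := by omega
        rw [if_neg (fun h => absurd h.2 (not_le.mpr hlt)), hmx, if_neg hMt]
        simp only [firstIdx, if_neg (by omega : ¬ x = t.foldr max 0), Prod.mk.injEq]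
        refine ⟨by push_cast; ring, trivial⟩

-- ===== VERDICT (by name: the statement is the Claim_ definition above) =====
theorem selectWord_spec : Claim_equal_selectWord := by
  intro d c _ hpre
  unfold Spec_selectWord
  rw [selectWord_char]
  unfold selectWord_alt
  simp only [alt_counts d c hpre]
  have hnn : ∀ x ∈ d.map (pvScore c), 0 ≤ x := by
    intro x hx
    obtain ⟨w, _, rfl⟩ := List.mem_map.mp hx
    exact pvScore_nonneg c w
  have hlen : ((d.map (pvScore c)).length : Int) = ((d.length : Nat) : Int) := by simp
  rw [hlen, pyRange_cast, List.foldl_reverse, List.foldr_map]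
  have hsel := sel_foldr (d.map (pvScore c)) 0 hnn
  simp only [Nat.zero_add, List.length_map] at hsel
  have hfun : (fun (j : Nat) (st : Int × Int) =>
        (fun (st : Int × Int) (i : Int) =>
          let x := (PySem.List.pyGet? (d.map (pvScore c)) i).getD 0
          if x > 0 ∧ x ≥ st.2 then (i, x) else st) st (j : Int))
      = (fun j st => if (d.map (pvScore c)).getD j 0 > 0 ∧ (d.map (pvScore c)).getD j 0 ≥ st.2
          then (((j : Nat) : Int), (d.map (pvScore c)).getD j 0) else st) := by
    funext j st
    simp [PySem.List.pyGet?_natCast, List.getD_eq_getElem?_getD]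
  rw [hfun, hsel]
  have hMM : d.foldl (fun a w => max a (pvScore c w)) 0 = (d.map (pvScore c)).foldr max 0 := by
    rw [← List.foldl_map, List.foldl_eq_foldr]
  rw [hMM]
  by_cases hM : (d.map (pvScore c)).foldr max 0 = 0
  · simp [hM]
  · rw [if_neg hM, if_neg hM]
    simp
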